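-- pv_equiv track=rewrite | github.com/somsagar07/Context_Optimization | sft_posttrain.py | encode_tools
-- ===== SOURCE A (Python) =====
-- def encode_tools(tools_list):
--     """Encode tool list to bitmask index."""
--     tool_mapping = {
--         "calculator": 1,
--         "web_search": 2,
--         "python": 4,
--         "ocr_reader": 8,
--     }
--     idx = 0
--     for tool in tools_list:
--         if tool in tool_mapping:
--             idx |= tool_mapping[tool]
--     return idx
-- ===== SOURCE B (Python) =====
-- def encode_tools(tools_list):
--     """Encode tool list to bitmask index."""
--     present = set(tools_list)
--     idx = 0
--     for name, bit in (("calculator", 1), ("web_search", 2), ("python", 4), ("ocr_reader", 8)):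
--         if name in present:
--             idx |= bit
--     return idx
-- ===== Notes on version B (the rewrite author's own statement) =====
-- stated objective: idiomatic
-- what changed: Reverses the traversal: B builds a set of the input once and loops over the fixed four (name, bit) pairs, OR-ing in a bit when its name is present, instead of looping over the variable-length input and looking each element up in the dict.
import Mathlib
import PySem

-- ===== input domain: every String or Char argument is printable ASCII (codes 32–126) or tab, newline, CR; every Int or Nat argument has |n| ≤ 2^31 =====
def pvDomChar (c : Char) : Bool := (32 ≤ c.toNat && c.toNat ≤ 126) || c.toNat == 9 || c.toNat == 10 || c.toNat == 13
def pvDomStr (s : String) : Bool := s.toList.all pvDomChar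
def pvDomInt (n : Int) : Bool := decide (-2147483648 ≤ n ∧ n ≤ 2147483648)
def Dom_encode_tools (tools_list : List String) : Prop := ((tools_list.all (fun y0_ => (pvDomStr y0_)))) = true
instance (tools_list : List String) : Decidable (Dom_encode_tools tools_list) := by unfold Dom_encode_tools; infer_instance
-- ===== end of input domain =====

-- B reverses the traversal: it builds a set of the input once and loops over the fixed
-- four (name, bit) pairs, instead of looping over the input with dict lookups.

-- ===== PORT A =====
def toolMapping : PySem.Dict String Int :=
  PySem.Dict.ofList [("calculator", 1), ("web_search", 2), ("python", 4), ("ocr_reader", 8)]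

def encode_tools (tools_list : List String) : Int :=
  tools_list.foldl
    (fun idx tool =>
      if toolMapping.contains tool then PySem.Int.bor idx ((toolMapping.get? tool).getD 0)
      else idx)
    0

-- ===== PORT B =====
def encode_tools_alt (tools_list : List String) : Int :=
  let present : PySem.Set String := PySem.Set.ofList tools_list
  [("calculator", (1 : Int)), ("web_search", 2), ("python", 4), ("ocr_reader", 8)].foldl
    (fun idx p => if p.1 ∈ present then PySem.Int.bor idx p.2 else idx)
    0

-- ===== PRECONDITION & SPEC =====
def Spec_encode_tools (tools_list : List String) (out : Int) : Prop := out = encode_tools_alt tools_list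
instance (tools_list : List String) (out : Int) : Decidable (Spec_encode_tools tools_list out) := by unfold Spec_encode_tools; infer_instance

-- ===== CLAIM (what is proved, stated in full; the proofs are below) =====
def Claim_equal_encode_tools : Prop := ∀ (tools_list : List String), Dom_encode_tools tools_list → Spec_encode_tools tools_list (encode_tools tools_list)

-- ===== LEMMAS AND PROOFS =====

-- the bit A's dict lookup contributes for one element
def pvBit (t : String) : Nat :=
  if t = "calculator" then 1 else if t = "web_search" then 2
  else if t = "python" then 4 else if t = "ocr_reader" then 8 else 0

-- the final mask as a function of the four memberships
def pvMask (l : List String) : Nat :=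
  (if "calculator" ∈ l then 1 else 0) ||| (if "web_search" ∈ l then 2 else 0) |||
  (if "python" ∈ l then 4 else 0) ||| (if "ocr_reader" ∈ l then 8 else 0)

theorem pvStep_eq (n : Nat) (t : String) :
    (if toolMapping.contains t then PySem.Int.bor (n : Int) ((toolMapping.get? t).getD 0)
     else (n : Int)) = ((n ||| pvBit t : Nat) : Int) := by
  by_cases e1 : t = "calculator"
  · subst e1
    rw [if_pos (by decide), show (toolMapping.get? "calculator") = some 1 from by decide]
    simp [pvBit]
    exact_mod_cast PySem.Int.bor_natCast n 1
  · by_cases e2 : t = "web_search"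
    · subst e2
      rw [if_pos (by decide), show (toolMapping.get? "web_search") = some 2 from by decide]
      simp [pvBit]
      exact_mod_cast PySem.Int.bor_natCast n 2
    · by_cases e3 : t = "python"
      · subst e3
        rw [if_pos (by decide), show (toolMapping.get? "python") = some 4 from by decide]
        simp [pvBit]
        exact_mod_cast PySem.Int.bor_natCast n 4
      · by_cases e4 : t = "ocr_reader"
        · subst e4
          rw [if_pos (by decide), show (toolMapping.get? "ocr_reader") = some 8 from by decide]
          simp [pvBit]
          exact_mod_cast PySem.Int.bor_natCast n 8
        · rw [if_neg, pvBit, if_neg e1, if_neg e2, if_neg e3, if_neg e4]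
          · simp
          · simp [toolMapping, PySem.Dict.ofList, PySem.Dict.update, List.foldl,
              PySem.Dict.contains_insert, PySem.Dict.contains_empty, beq_iff_eq]
            exact ⟨e4, e3, e2, e1⟩

theorem pvMask_cons (t : String) (l : List String) :
    pvMask (t :: l) = pvBit t ||| pvMask l := by
  by_cases e1 : t = "calculator" <;> by_cases e2 : t = "web_search" <;>
    by_cases e3 : t = "python" <;> by_cases e4 : t = "ocr_reader" <;>
    by_cases h1 : "calculator" ∈ l <;> by_cases h2 : "web_search" ∈ l <;>
    by_cases h3 : "python" ∈ l <;> by_cases h4 : "ocr_reader" ∈ l <;>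
    simp_all [pvMask, pvBit, List.mem_cons, eq_comm]

theorem pvFold_eq (l : List String) (n : Nat) :
    l.foldl
      (fun idx tool =>
        if toolMapping.contains tool then PySem.Int.bor idx ((toolMapping.get? tool).getD 0)
        else idx)
      (n : Int) = ((n ||| pvMask l : Nat) : Int) := by
  induction l generalizing n with
  | nil => simp [pvMask]
  | cons t l ih =>
    rw [List.foldl_cons, pvStep_eq, ih, pvMask_cons, ← Nat.lor_assoc]

theorem pvAlt_eq (l : List String) : encode_tools_alt l = ((pvMask l : Nat) : Int) := by
  by_cases h1 : "calculator" ∈ l <;> by_cases h2 : "web_search" ∈ l <;>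
    by_cases h3 : "python" ∈ l <;> by_cases h4 : "ocr_reader" ∈ l <;>
    simp [encode_tools_alt, pvMask, PySem.Set.mem_ofList, h1, h2, h3, h4] <;> decide

-- ===== VERDICT (by name: the statement is the Claim_ definition above) =====
theorem encode_tools_spec : Claim_equal_encode_tools := by
  intro l _
  show encode_tools l = encode_tools_alt l
  rw [pvAlt_eq, encode_tools]
  simpa using pvFold_eq l 0
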